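-- pv_equiv track=rewrite | github.com/priyankaghosh2020/myWorks | QueenAttack.py | findValidPathScroller
-- ===== SOURCE A (Python) =====
-- def checkValid( x1 , y1, arr) :
--     for (x, y) in arr :
--         if x == x1 + 1 and y == y1 + 1 :
--             return False
--     return True
--
-- def checkSafe( x , y, N) :
--     return True if (x < N and x >= 0 and y < N and y >= 0) else False
--
-- def findValidPathScroller(boardMatrix , numOfBrd , qRow , qCol , i , j , obsArr, numOfPossibleMoves) :
--     if not (checkValid(qRow , qCol , obsArr) and checkSafe(qRow , qCol , numOfBrd) ) :
--         return 0
--     elif (qRow , qCol) in numOfPossibleMoves :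
--         return 0
--
--     num = 1
--     numOfPossibleMoves.append((qRow, qCol))
--     return num + findValidPathScroller(boardMatrix , numOfBrd , qRow + i , qCol + j , i , j , obsArr, numOfPossibleMoves)
-- ===== SOURCE B (Python) =====
-- def checkValid(x1, y1, arr):
--     return all(not (x == x1 + 1 and y == y1 + 1) for (x, y) in arr)
--
-- def checkSafe(x, y, N):
--     return 0 <= x < N and 0 <= y < N
--
-- def findValidPathScroller(boardMatrix, numOfBrd, qRow, qCol, i, j, obsArr, numOfPossibleMoves):
--     count = 0
--     while (checkValid(qRow, qCol, obsArr) and checkSafe(qRow, qCol, numOfBrd)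
--            and (qRow, qCol) not in numOfPossibleMoves):
--         numOfPossibleMoves.append((qRow, qCol))
--         count += 1
--         qRow += i
--         qCol += j
--     return count
-- ===== Notes on version B (the rewrite author's own statement) =====
-- stated objective: alternative
-- what changed: Replaces A's linear recursion (1 + recursive call on the advanced position) with an iterative while-loop carrying a count accumulator, so deep walks no longer grow the call stack; the helper predicates are rewritten with all()/chained comparisons.
import Mathlib
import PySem

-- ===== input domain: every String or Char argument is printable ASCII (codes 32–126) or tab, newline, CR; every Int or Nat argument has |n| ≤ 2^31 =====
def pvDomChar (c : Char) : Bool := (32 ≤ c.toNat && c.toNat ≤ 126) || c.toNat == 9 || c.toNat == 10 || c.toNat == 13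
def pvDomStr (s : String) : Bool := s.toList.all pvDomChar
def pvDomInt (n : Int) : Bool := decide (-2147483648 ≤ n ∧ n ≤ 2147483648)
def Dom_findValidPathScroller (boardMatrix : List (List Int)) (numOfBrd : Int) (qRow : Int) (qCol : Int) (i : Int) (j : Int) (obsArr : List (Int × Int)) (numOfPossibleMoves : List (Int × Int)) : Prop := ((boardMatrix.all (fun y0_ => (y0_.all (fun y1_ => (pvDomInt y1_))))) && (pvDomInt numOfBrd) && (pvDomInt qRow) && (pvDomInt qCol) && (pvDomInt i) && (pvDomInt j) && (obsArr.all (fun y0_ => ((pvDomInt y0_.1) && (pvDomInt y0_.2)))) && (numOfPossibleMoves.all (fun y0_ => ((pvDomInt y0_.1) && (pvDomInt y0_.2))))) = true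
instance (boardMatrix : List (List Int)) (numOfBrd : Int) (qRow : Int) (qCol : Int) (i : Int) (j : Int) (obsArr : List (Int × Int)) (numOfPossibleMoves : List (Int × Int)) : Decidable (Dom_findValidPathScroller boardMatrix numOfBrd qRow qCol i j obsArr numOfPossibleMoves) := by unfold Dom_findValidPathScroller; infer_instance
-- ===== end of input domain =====

-- B replaces A's linear recursion by an iterative while-loop with a count accumulator
-- (alternative decomposition; same cost). Both A and B append the visited cells to the
-- numOfPossibleMoves argument in place (same observable mutation); the theorems below
-- are about the return value.

-- ===== PORT A =====
-- number of board cells not yet in the moves list: termination measure for both ports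
def pvMeasure (N : Int) (moves : List (Int × Int)) : Nat :=
  ((Finset.range N.toNat ×ˢ Finset.range N.toNat).filter
    (fun p => ((p.1 : Int), (p.2 : Int)) ∉ moves)).card

def pvCheckValid (x1 y1 : Int) (arr : List (Int × Int)) : Bool :=
  match arr with
  | [] => true
  | (x, y) :: rest =>
    if x = x1 + 1 ∧ y = y1 + 1 then false else pvCheckValid x1 y1 rest

def pvCheckSafe (x y N : Int) : Bool :=
  if x < N ∧ x ≥ 0 ∧ y < N ∧ y ≥ 0 then true else false

theorem pvMeasure_lt (N qR qC : Int) (moves : List (Int × Int))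
    (h1 : 0 ≤ qR) (h2 : qR < N) (h3 : 0 ≤ qC) (h4 : qC < N)
    (hm : (qR, qC) ∉ moves) :
    pvMeasure N (moves ++ [(qR, qC)]) < pvMeasure N moves := by
  unfold pvMeasure
  apply Finset.card_lt_card
  have hsub : ((Finset.range N.toNat ×ˢ Finset.range N.toNat).filter
      (fun p => ((p.1 : Int), (p.2 : Int)) ∉ moves ++ [(qR, qC)])) ⊆
      ((Finset.range N.toNat ×ˢ Finset.range N.toNat).filter
      (fun p => ((p.1 : Int), (p.2 : Int)) ∉ moves)) := by
    intro p hp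
    simp only [Finset.mem_filter, List.mem_append] at hp ⊢
    exact ⟨hp.1, fun h => hp.2 (Or.inl h)⟩
  rw [Finset.ssubset_iff_of_subset hsub]
  refine ⟨(qR.toNat, qC.toNat), ?_, ?_⟩
  · simp only [Finset.mem_filter, Finset.mem_product, Finset.mem_range,
      Int.toNat_of_nonneg h1, Int.toNat_of_nonneg h3]
    exact ⟨⟨by omega, by omega⟩, hm⟩
  · simp [Finset.mem_filter, Int.toNat_of_nonneg h1, Int.toNat_of_nonneg h3]

theorem pvCheckSafe_true {x y N : Int} (h : pvCheckSafe x y N = true) :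
    x < N ∧ 0 ≤ x ∧ y < N ∧ 0 ≤ y := by
  by_cases hc : x < N ∧ x ≥ 0 ∧ y < N ∧ y ≥ 0
  · exact ⟨hc.1, hc.2.1, hc.2.2.1, hc.2.2.2⟩
  · simp [pvCheckSafe, hc] at h

def findValidPathScroller (boardMatrix : List (List Int)) (numOfBrd : Int) (qRow : Int) (qCol : Int) (i : Int) (j : Int) (obsArr : List (Int × Int)) (numOfPossibleMoves : List (Int × Int)) : Int :=
  if !(pvCheckValid qRow qCol obsArr && pvCheckSafe qRow qCol numOfBrd) then 0
  else if (qRow, qCol) ∈ numOfPossibleMoves then 0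
  else 1 + findValidPathScroller boardMatrix numOfBrd (qRow + i) (qCol + j) i j obsArr
        (numOfPossibleMoves ++ [(qRow, qCol)])
termination_by pvMeasure numOfBrd numOfPossibleMoves
decreasing_by
  rename_i h1 h2
  have h1' : (pvCheckValid qRow qCol obsArr = true) ∧ (pvCheckSafe qRow qCol numOfBrd = true) := by
    rw [← Bool.and_eq_true]; revert h1; simp
  have hs := pvCheckSafe_true h1'.2
  exact pvMeasure_lt numOfBrd qRow qCol numOfPossibleMoves hs.2.1 hs.1 hs.2.2.2 hs.2.2.1 h2

-- ===== PORT B =====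
def pvCheckValidB (x1 y1 : Int) (arr : List (Int × Int)) : Bool :=
  arr.all (fun p => !(decide (p.1 = x1 + 1 ∧ p.2 = y1 + 1)))

def pvCheckSafeB (x y N : Int) : Bool :=
  decide (0 ≤ x ∧ x < N ∧ 0 ≤ y ∧ y < N)

-- the while-loop of Source B: state (qRow, qCol, moves, count)
def pvAltLoop (numOfBrd qRow qCol i j : Int) (obsArr : List (Int × Int)) (moves : List (Int × Int)) (count : Int) : Int :=
  if pvCheckValidB qRow qCol obsArr && pvCheckSafeB qRow qCol numOfBrd
      && !(decide ((qRow, qCol) ∈ moves)) then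
    pvAltLoop numOfBrd (qRow + i) (qCol + j) i j obsArr (moves ++ [(qRow, qCol)]) (count + 1)
  else count
termination_by pvMeasure numOfBrd moves
decreasing_by
  rename_i h
  simp only [Bool.and_eq_true, Bool.not_eq_true', decide_eq_false_iff_not,
    pvCheckSafeB, decide_eq_true_eq] at h
  exact pvMeasure_lt numOfBrd qRow qCol moves h.1.2.1 h.1.2.2.1 h.1.2.2.2.1 h.1.2.2.2.2 h.2

def findValidPathScroller_alt (boardMatrix : List (List Int)) (numOfBrd : Int) (qRow : Int) (qCol : Int) (i : Int) (j : Int) (obsArr : List (Int × Int)) (numOfPossibleMoves : List (Int × Int)) : Int :=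
  pvAltLoop numOfBrd qRow qCol i j obsArr numOfPossibleMoves 0

-- ===== PRECONDITION & SPEC =====
def Spec_findValidPathScroller (boardMatrix : List (List Int)) (numOfBrd : Int) (qRow : Int) (qCol : Int) (i : Int) (j : Int) (obsArr : List (Int × Int)) (numOfPossibleMoves : List (Int × Int)) (out : Int) : Prop := out = findValidPathScroller_alt boardMatrix numOfBrd qRow qCol i j obsArr numOfPossibleMoves
instance (boardMatrix : List (List Int)) (numOfBrd : Int) (qRow : Int) (qCol : Int) (i : Int) (j : Int) (obsArr : List (Int × Int)) (numOfPossibleMoves : List (Int × Int)) (out : Int) : Decidable (Spec_findValidPathScroller boardMatrix numOfBrd qRow qCol i j obsArr numOfPossibleMoves out) := by unfold Spec_findValidPathScroller; infer_instance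

-- ===== CLAIM (what is proved, stated in full; the proofs are below) =====
def Claim_equal_findValidPathScroller : Prop := ∀ (boardMatrix : List (List Int)) (numOfBrd : Int) (qRow : Int) (qCol : Int) (i : Int) (j : Int) (obsArr : List (Int × Int)) (numOfPossibleMoves : List (Int × Int)), Dom_findValidPathScroller boardMatrix numOfBrd qRow qCol i j obsArr numOfPossibleMoves → Spec_findValidPathScroller boardMatrix numOfBrd qRow qCol i j obsArr numOfPossibleMoves (findValidPathScroller boardMatrix numOfBrd qRow qCol i j obsArr numOfPossibleMoves)


-- ===== LEMMAS AND PROOFS =====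
theorem pvCheckValid_eq (x1 y1 : Int) (arr : List (Int × Int)) :
    pvCheckValidB x1 y1 arr = pvCheckValid x1 y1 arr := by
  induction arr with
  | nil => rfl
  | cons p rest ih =>
    obtain ⟨x, y⟩ := p
    rw [show pvCheckValidB x1 y1 ((x, y) :: rest) =
        ((!decide (x = x1 + 1 ∧ y = y1 + 1)) && pvCheckValidB x1 y1 rest) from rfl]
    by_cases h : x = x1 + 1 ∧ y = y1 + 1
    · simp [pvCheckValid, h]
    · rw [pvCheckValid, if_neg h, ← ih]
      have hd : (!decide (x = x1 + 1 ∧ y = y1 + 1)) = true := by simp [h]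
      rw [hd, Bool.true_and]

theorem pvCheckSafe_eq (x y N : Int) :
    pvCheckSafeB x y N = pvCheckSafe x y N := by
  simp only [pvCheckSafeB, pvCheckSafe]
  by_cases h : x < N ∧ x ≥ 0 ∧ y < N ∧ y ≥ 0
  · simp [h]
  · simp [h]; omega

theorem pvAltLoop_eq (boardMatrix : List (List Int)) (numOfBrd qRow qCol i j : Int)
    (obsArr : List (Int × Int)) (moves : List (Int × Int)) (count : Int) :
    pvAltLoop numOfBrd qRow qCol i j obsArr moves count =
      count + findValidPathScroller boardMatrix numOfBrd qRow qCol i j obsArr moves := by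
  refine @pvAltLoop.induct numOfBrd i j obsArr
    (motive := fun r c mv cnt => pvAltLoop numOfBrd r c i j obsArr mv cnt =
      cnt + findValidPathScroller boardMatrix numOfBrd r c i j obsArr mv)
    ?_ ?_ qRow qCol moves count
  · intro r c mv cnt hcond ih
    rw [pvAltLoop, if_pos hcond, findValidPathScroller]
    simp only [pvCheckValid_eq, pvCheckSafe_eq, Bool.and_eq_true, Bool.not_eq_true',
      decide_eq_false_iff_not] at hcond
    rw [if_neg (by simp [hcond.1.1, hcond.1.2]), if_neg hcond.2, ih]
    ring
  · intro r c mv cnt hcond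
    rw [pvAltLoop, if_neg hcond, findValidPathScroller]
    by_cases hv : (pvCheckValid r c obsArr && pvCheckSafe r c numOfBrd) = true
    · have hv' := hv
      rw [Bool.and_eq_true] at hv'
      have hmem : (r, c) ∈ mv := by
        by_contra hm
        exact hcond (by simp [pvCheckValid_eq, pvCheckSafe_eq, hv'.1, hv'.2, hm])
      rw [if_neg (by simp [hv]), if_pos hmem]
      ring
    · simp only [Bool.not_eq_true] at hv
      rw [if_pos (by rw [hv]; rfl)]
      ring

-- ===== VERDICT (by name: the statement is the Claim_ definition above) =====
theorem findValidPathScroller_spec : Claim_equal_findValidPathScroller := by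
  intro boardMatrix numOfBrd qRow qCol i j obsArr numOfPossibleMoves _
  unfold Spec_findValidPathScroller findValidPathScroller_alt
  rw [pvAltLoop_eq boardMatrix]
  ring
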